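-- pv_equiv track=rewrite | github.com/mingzhuqiuxiahhq/cs61a | Desktop/cs61a/proj/hog/test.py | is_swap
-- ===== SOURCE A (Python) =====
-- def is_swap(player_score, opponent_score):
--     """
--     Return whether the two scores should be swapped
--     """
--     # BEGIN PROBLEM 4
--     #create vars to hold digits
--     player_left_digit, oppon_left_digit, player_right_digit, oppon_right_digit = 0,0,0,0
--     #calculate right score first before calculate left
--     if player_score >= 10:
--         player_right_digit = player_score % 10
--     else:
--         player_left_digit = player_score
--         player_right_digit = player_score
--     if opponent_score >= 10:
--         oppon_right_digit = opponent_score % 10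
--     else:
--         oppon_left_digit = opponent_score
--         oppon_right_digit = opponent_score
--     while player_score >= 10:
--         player_left_digit = player_score // 10
--         player_score = player_score //10
--     while opponent_score >= 10:
--         oppon_left_digit = opponent_score // 10
--         opponent_score = opponent_score //10
--     if (player_left_digit *player_right_digit) == (oppon_left_digit * oppon_right_digit):
--         return True
--     else:
--         return False
-- ===== SOURCE B (Python) =====
-- def is_swap(player_score, opponent_score):
--     """
--     Return whether the two scores should be swapped
--     """
--     def digit_product(score):
--         # fewer than two digits: product is the score squared
--         if score < 10:
--             return score * score
--         s = str(score)
--         return int(s[0]) * int(s[-1])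
--     return digit_product(player_score) == digit_product(opponent_score)
-- ===== Notes on version B (the rewrite author's own statement) =====
-- stated objective: simpler
-- what changed: Replaces the two //10-stripping while-loops and four accumulator variables with a single helper that reads the leading and trailing digit directly off the decimal string (int(s[0]), int(s[-1])), squaring scores below 10 as A's <10 branch does.
import Mathlib
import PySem

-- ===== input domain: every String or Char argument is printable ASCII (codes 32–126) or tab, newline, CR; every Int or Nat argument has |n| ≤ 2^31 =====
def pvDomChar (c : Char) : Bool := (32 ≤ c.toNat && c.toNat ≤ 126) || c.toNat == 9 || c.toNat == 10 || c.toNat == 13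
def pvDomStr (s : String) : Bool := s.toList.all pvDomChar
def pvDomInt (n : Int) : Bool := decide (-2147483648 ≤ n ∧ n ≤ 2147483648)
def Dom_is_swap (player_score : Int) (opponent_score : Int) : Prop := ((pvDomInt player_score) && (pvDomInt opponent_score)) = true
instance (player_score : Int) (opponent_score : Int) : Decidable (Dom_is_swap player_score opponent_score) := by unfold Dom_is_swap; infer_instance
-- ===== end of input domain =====

-- B replaces A's two //10-stripping while-loops with direct string indexing of the
-- leading/trailing decimal digit (objective: simpler).

-- ===== PORT A =====
-- the while loop 'while score >= 10: left = score // 10; score = score // 10';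
-- returns the final (score, left)
def pvWhileA (score : Int) (left : Int) : Int × Int :=
  if 10 ≤ score then
    pvWhileA (PySem.Int.floordiv score 10) (PySem.Int.floordiv score 10)
  else (score, left)
termination_by score.toNat
decreasing_by
  rw [PySem.Int.floordiv_eq_ediv_of_pos (by omega : (0:Int) < 10)]
  omega

def is_swap (player_score : Int) (opponent_score : Int) : Bool :=
  let player_left_digit : Int := 0
  let oppon_left_digit : Int := 0
  let player_right_digit : Int := 0
  let oppon_right_digit : Int := 0
  let (player_left_digit, player_right_digit) :=
    if 10 ≤ player_score then (player_left_digit, PySem.Int.mod player_score 10)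
    else (player_score, player_score)
  let (oppon_left_digit, oppon_right_digit) :=
    if 10 ≤ opponent_score then (oppon_left_digit, PySem.Int.mod opponent_score 10)
    else (opponent_score, opponent_score)
  let (_player_score, player_left_digit) := pvWhileA player_score player_left_digit
  let (_opponent_score, oppon_left_digit) := pvWhileA opponent_score oppon_left_digit
  if player_left_digit * player_right_digit == oppon_left_digit * oppon_right_digit then
    true
  else
    false

-- ===== PORT B =====
-- 'int(s[0]) * int(s[-1])' — the .getD 0 defaults are unreachable: for score ≥ 10,
-- str(score) is nonempty and consists of decimal digits, so Python raises nothing here.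
def pvDigitProduct (score : Int) : Int :=
  if score < 10 then score * score
  else
    let s := PySem.Int.toStr score
    let lead : Int :=
      ((PySem.Str.pyGet? s 0).bind (fun c => PySem.Int.ofChars? [c])).getD 0
    let trail : Int :=
      ((PySem.Str.pyGet? s (-1)).bind (fun c => PySem.Int.ofChars? [c])).getD 0
    lead * trail

def is_swap_alt (player_score : Int) (opponent_score : Int) : Bool :=
  pvDigitProduct player_score == pvDigitProduct opponent_score

-- ===== PRECONDITION & SPEC =====
def Spec_is_swap (player_score : Int) (opponent_score : Int) (out : Bool) : Prop := out = is_swap_alt player_score opponent_score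
instance (player_score : Int) (opponent_score : Int) (out : Bool) : Decidable (Spec_is_swap player_score opponent_score out) := by unfold Spec_is_swap; infer_instance

-- ===== CLAIM (what is proved, stated in full; the proofs are below) =====
def Claim_equal_is_swap : Prop := ∀ (player_score : Int) (opponent_score : Int), Dom_is_swap player_score opponent_score → Spec_is_swap player_score opponent_score (is_swap player_score opponent_score)

-- ===== LEMMAS AND PROOFS =====

-- leading decimal digit of a natural number
def natLead (n : ℕ) : ℕ :=
  if n < 10 then n else natLead (n / 10)
termination_by n
decreasing_by omega

-- reference digit list: digits of n, most significant first
def pvDigs (n : ℕ) : List Char :=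
  if n < 10 then [Nat.digitChar n] else pvDigs (n / 10) ++ [Nat.digitChar (n % 10)]
termination_by n
decreasing_by omega

lemma toDigitsCore_shift (f : ℕ) : ∀ (n : ℕ) (ds : List Char),
    Nat.toDigitsCore 10 f n ds = Nat.toDigitsCore 10 f n [] ++ ds := by
  induction f with
  | zero => intro n ds; simp [Nat.toDigitsCore]
  | succ f ih =>
    intro n ds
    simp only [Nat.toDigitsCore]
    by_cases h : n / 10 = 0
    · simp [h]
    · simp only [h, if_false]
      rw [ih (n / 10) [Nat.digitChar (n % 10)], ih (n / 10) (Nat.digitChar (n % 10) :: ds),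
        List.append_assoc]
      rfl

lemma toDigitsCore_eq_pvDigs (f : ℕ) : ∀ (n : ℕ), n < f →
    Nat.toDigitsCore 10 f n [] = pvDigs n := by
  induction f with
  | zero => omega
  | succ f ih =>
    intro n hn
    simp only [Nat.toDigitsCore]
    by_cases h : n / 10 = 0
    · have h10 : n < 10 := by omega
      rw [pvDigs]
      simp [h, h10, Nat.mod_eq_of_lt h10]
    · have h10 : ¬ n < 10 := by omega
      simp only [h, if_false]
      rw [toDigitsCore_shift, ih (n / 10) (by omega)]
      conv_rhs => rw [pvDigs, if_neg h10]

lemma toDigits_eq_pvDigs (n : ℕ) : Nat.toDigits 10 n = pvDigs n :=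
  toDigitsCore_eq_pvDigs (n + 1) n (by omega)

lemma pvDigs_ne_nil (n : ℕ) : pvDigs n ≠ [] := by
  rw [pvDigs]
  by_cases h : n < 10 <;> simp [h]

lemma pvDigs_head? (n : ℕ) : (pvDigs n).head? = some (Nat.digitChar (natLead n)) := by
  induction n using Nat.strong_induction_on with
  | _ n ih =>
    rw [pvDigs, natLead]
    by_cases h : n < 10
    · simp [h]
    · rw [if_neg h, if_neg h]
      rcases hd : pvDigs (n / 10) with _ | ⟨c, cs⟩
      · exact absurd hd (pvDigs_ne_nil _)
      · have := ih (n / 10) (by omega)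
        rw [hd] at this
        simpa using this

lemma pvDigs_getLast? (n : ℕ) (h : ¬ n < 10) :
    (pvDigs n).getLast? = some (Nat.digitChar (n % 10)) := by
  rw [pvDigs, if_neg h, List.getLast?_concat]

lemma natLead_lt_ten (n : ℕ) : natLead n < 10 := by
  induction n using Nat.strong_induction_on with
  | _ n ih =>
    rw [natLead]
    by_cases h : n < 10
    · simp [h]
    · rw [if_neg h]; exact ih (n / 10) (by omega)

lemma ofChars?_digitChar (d : ℕ) (hd : d < 10) :
    PySem.Int.ofChars? [Nat.digitChar d] = some (d : Int) := by
  interval_cases d <;> decide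

lemma pvWhileA_natCast (n : ℕ) (left : Int) :
    pvWhileA (n : Int) left =
      if n < 10 then ((n : Int), left) else ((natLead n : Int), (natLead n : Int)) := by
  induction n using Nat.strong_induction_on generalizing left with
  | _ n ih =>
    rw [pvWhileA]
    by_cases h : n < 10
    · rw [if_neg (by exact_mod_cast by omega : ¬ (10:Int) ≤ (n:Int)), if_pos h]
    · rw [if_pos (by exact_mod_cast by omega : (10:Int) ≤ (n:Int)), if_neg h]
      have hfd : PySem.Int.floordiv (n : Int) 10 = ((n / 10 : ℕ) : Int) := by
        exact_mod_cast PySem.Int.floordiv_natCast n 10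
      rw [hfd, ih (n / 10) (by omega)]
      have hnl : natLead n = natLead (n / 10) := by
        conv_lhs => rw [natLead, if_neg h]
      rw [hnl]
      by_cases h2 : n / 10 < 10
      · rw [if_pos h2, show natLead (n / 10) = n / 10 from by rw [natLead, if_pos h2]]
      · rw [if_neg h2]

lemma pvDigitProduct_natCast (n : ℕ) (h : ¬ n < 10) :
    pvDigitProduct (n : Int) = (natLead n : Int) * ((n % 10 : ℕ) : Int) := by
  have hInt : ¬ ((n : Int) < 10) := by exact_mod_cast by omega
  rw [pvDigitProduct, if_neg hInt]
  have hchars : (PySem.Int.toStr (n : Int)).toList = pvDigs n := by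
    rw [PySem.Int.toList_toStr, PySem.Int.toChars]
    rw [if_neg (by exact_mod_cast by omega : ¬ ((n:Int) < 0))]
    simpa using toDigits_eq_pvDigs n
  have hhead : PySem.Str.pyGet? (PySem.Int.toStr (n : Int)) 0 =
      some (Nat.digitChar (natLead n)) := by
    have h0 : PySem.Str.pyGet? (PySem.Int.toStr (n : Int)) ((0 : ℕ) : Int) =
        (PySem.Int.toStr (n : Int)).toList[(0 : ℕ)]? := PySem.Str.pyGet?_natCast _ _
    rw [show (0 : Int) = ((0 : ℕ) : Int) from rfl, h0, hchars,
      ← List.head?_eq_getElem?]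
    exact pvDigs_head? n
  have hlast : PySem.Str.pyGet? (PySem.Int.toStr (n : Int)) (-1) =
      some (Nat.digitChar (n % 10)) := by
    rw [PySem.Str.pyGet?, PySem.Chars.pyGet?, hchars, PySem.List.pyGet?_neg_one,
      pvDigs_getLast? n h]
  simp only [hhead, hlast, Option.bind_some,
    ofChars?_digitChar (natLead n) (natLead_lt_ten n),
    ofChars?_digitChar (n % 10) (by omega : n % 10 < 10), Option.getD_some]

-- A's left*right product for one score equals B's digit product
lemma prod_eq (x : Int) :
    ((pvWhileA x (if 10 ≤ x then ((0:Int), PySem.Int.mod x 10) else (x, x)).1).2)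
        * (if 10 ≤ x then ((0:Int), PySem.Int.mod x 10) else (x, x)).2
      = pvDigitProduct x := by
  by_cases h : 10 ≤ x
  · obtain ⟨n, rfl⟩ : ∃ n : ℕ, x = (n : Int) := ⟨x.toNat, by omega⟩
    have hn : ¬ n < 10 := by exact_mod_cast by omega
    rw [if_pos h]
    dsimp only
    rw [pvWhileA_natCast, if_neg hn, pvDigitProduct_natCast n hn]
    have hm : PySem.Int.mod (n : Int) 10 = ((n % 10 : ℕ) : Int) := by
      exact_mod_cast PySem.Int.mod_natCast n 10
    rw [hm]
  · have hx : x < 10 := by omega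
    rw [if_neg h]
    dsimp only
    rw [pvWhileA, if_neg h, pvDigitProduct, if_pos hx]

-- ===== VERDICT (by name: the statement is the Claim_ definition above) =====
theorem is_swap_spec : Claim_equal_is_swap := by
  intro p o _
  show is_swap p o = is_swap_alt p o
  rw [is_swap, is_swap_alt]
  simp only
  rw [prod_eq p, prod_eq o]
  cases pvDigitProduct p == pvDigitProduct o <;> simp
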